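-- pv_equiv track=rewrite | github.com/CorLont/CryptoSmartTraderv2 | technical_review_package/src/cryptosmarttrader/agents/agents/listing_detection_agent.py | _classify_token_category
-- ===== SOURCE A (Python) =====
-- def _classify_token_category(symbol: str) -> str:
--     """Classify token by category (simplified)"""
--     # In production, this would use comprehensive token database
--     category_hints = {
--         "defi": ["AAVE", "UNI", "COMP", "MKR", "SNX", "CRV"],
--         "gaming": ["AXS", "SAND", "MANA", "ENJ"],
--         "infrastructure": ["ETH", "DOT", "AVAX", "SOL", "MATIC"],
--         "payments": ["BTC", "XRP", "LTC", "BCH"],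
--     }
--
--     for category, tokens in category_hints.items():
--         if symbol in tokens:
--             return category
--
--     return "unknown"
-- ===== SOURCE B (Python) =====
-- # B: flat sorted (token, category) table + hand-written binary search (bisect_left),
-- # replacing A's linear scan over categories with per-list membership tests.
-- _PAIRS = [
--     ("AAVE", "defi"), ("AVAX", "infrastructure"), ("AXS", "gaming"),
--     ("BCH", "payments"), ("BTC", "payments"), ("COMP", "defi"),
--     ("CRV", "defi"), ("DOT", "infrastructure"), ("ENJ", "gaming"),
--     ("ETH", "infrastructure"), ("LTC", "payments"), ("MANA", "gaming"),
--     ("MATIC", "infrastructure"), ("MKR", "defi"), ("SAND", "gaming"),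
--     ("SNX", "defi"), ("SOL", "infrastructure"), ("UNI", "defi"),
--     ("XRP", "payments"),
-- ]
--
-- def _classify_token_category(symbol: str) -> str:
--     """Classify token by category (simplified)"""
--     lo, hi = 0, len(_PAIRS)
--     while lo < hi:
--         mid = (lo + hi) // 2
--         if _PAIRS[mid][0] < symbol:
--             lo = mid + 1
--         else:
--             hi = mid
--     if lo < len(_PAIRS) and _PAIRS[lo][0] == symbol:
--         return _PAIRS[lo][1]
--     return "unknown"
-- ===== Notes on version B (the rewrite author's own statement) =====
-- stated objective: alternative
-- what changed: B flattens the table into one sorted (token, category) list and answers with a hand-written binary search (bisect_left) plus a single equality check, replacing A's loop over categories with per-list membership scans.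
import Mathlib
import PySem

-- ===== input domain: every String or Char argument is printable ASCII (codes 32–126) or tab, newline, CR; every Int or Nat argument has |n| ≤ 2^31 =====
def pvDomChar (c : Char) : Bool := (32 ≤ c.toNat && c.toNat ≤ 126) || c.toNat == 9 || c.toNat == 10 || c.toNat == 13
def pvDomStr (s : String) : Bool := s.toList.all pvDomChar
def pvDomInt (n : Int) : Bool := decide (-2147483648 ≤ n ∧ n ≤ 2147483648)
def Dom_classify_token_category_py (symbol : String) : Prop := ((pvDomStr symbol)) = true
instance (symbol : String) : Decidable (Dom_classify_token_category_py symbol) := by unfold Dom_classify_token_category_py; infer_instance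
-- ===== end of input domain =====

-- B replaces A's loop over categories (membership test per list) by a binary search in one flat sorted (token, category) list; same return value everywhere.

-- ===== PORT A =====
-- the category_hints dict, as an insertion-ordered association list
def pvHints : List (String × List String) :=
  [("defi", ["AAVE", "UNI", "COMP", "MKR", "SNX", "CRV"]),
   ("gaming", ["AXS", "SAND", "MANA", "ENJ"]),
   ("infrastructure", ["ETH", "DOT", "AVAX", "SOL", "MATIC"]),
   ("payments", ["BTC", "XRP", "LTC", "BCH"])]

-- 'for category, tokens in category_hints.items(): if symbol in tokens: return category'
def pvLoopA (symbol : String) : List (String × List String) → String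
  | [] => "unknown"
  | (category, tokens) :: rest =>
      if symbol ∈ tokens then category else pvLoopA symbol rest

def classify_token_category_py (symbol : String) : String :=
  pvLoopA symbol pvHints

-- ===== PORT B =====
-- Source B's module-level _PAIRS: flat (token, category) list sorted by token
def pvPairs : List (String × String) :=
  [("AAVE", "defi"), ("AVAX", "infrastructure"), ("AXS", "gaming"),
   ("BCH", "payments"), ("BTC", "payments"), ("COMP", "defi"),
   ("CRV", "defi"), ("DOT", "infrastructure"), ("ENJ", "gaming"),
   ("ETH", "infrastructure"), ("LTC", "payments"), ("MANA", "gaming"),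
   ("MATIC", "infrastructure"), ("MKR", "defi"), ("SAND", "gaming"),
   ("SNX", "defi"), ("SOL", "infrastructure"), ("UNI", "defi"),
   ("XRP", "payments")]

-- hand port of Python's '<' on strings: lexicographic comparison of code points
-- (exact for all strings; Python compares unequal chars by code point, shorter prefix wins)
def pvCharsLt : List Char → List Char → Bool
  | [], [] => false
  | [], _ :: _ => true
  | _ :: _, [] => false
  | a :: as, b :: bs =>
      if a.toNat < b.toNat then true
      else if b.toNat < a.toNat then false
      else pvCharsLt as bs

def pvStrLt (a b : String) : Bool := pvCharsLt a.toList b.toList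

-- Source B's 'while lo < hi: …' bisect_left loop; the fuel (= pvPairs.length) only bounds
-- the iteration count — hi - lo strictly decreases each step, so it never runs out.
def pvBisect (symbol : String) : Nat → Nat → Nat → Nat
  | 0, lo, _ => lo
  | fuel + 1, lo, hi =>
      if lo < hi then
        let mid := (lo + hi) / 2
        if pvStrLt (pvPairs.getD mid ("", "")).1 symbol then
          pvBisect symbol fuel (mid + 1) hi
        else
          pvBisect symbol fuel lo mid
      else lo

def classify_token_category_py_alt (symbol : String) : String :=
  let lo := pvBisect symbol pvPairs.length 0 pvPairs.length
  if lo < pvPairs.length then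
    let p := pvPairs.getD lo ("", "")
    if p.1 = symbol then p.2 else "unknown"
  else "unknown"

-- ===== PRECONDITION & SPEC =====
def Spec_classify_token_category_py (symbol : String) (out : String) : Prop := out = classify_token_category_py_alt symbol
instance (symbol : String) (out : String) : Decidable (Spec_classify_token_category_py symbol out) := by unfold Spec_classify_token_category_py; infer_instance

-- ===== CLAIM (what is proved, stated in full; the proofs are below) =====
def Claim_equal_classify_token_category_py : Prop := ∀ (symbol : String), Dom_classify_token_category_py symbol → Spec_classify_token_category_py symbol (classify_token_category_py symbol)

-- ===== LEMMAS AND PROOFS =====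
-- every first component the final lookup can see is one of the 19 tokens
theorem pv_fst_mem : ∀ j, j < 19 → (pvPairs.getD j ("", "")).1 ∈
    (["AAVE", "AVAX", "AXS", "BCH", "BTC", "COMP", "CRV", "DOT", "ENJ", "ETH",
      "LTC", "MANA", "MATIC", "MKR", "SAND", "SNX", "SOL", "UNI", "XRP"] : List String) := by
  decide

theorem pv_eq (symbol : String) :
    classify_token_category_py symbol = classify_token_category_py_alt symbol := by
  rcases eq_or_ne symbol "AAVE" with h|h1
  · subst h; decide
  rcases eq_or_ne symbol "UNI" with h|h2
  · subst h; decide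
  rcases eq_or_ne symbol "COMP" with h|h3
  · subst h; decide
  rcases eq_or_ne symbol "MKR" with h|h4
  · subst h; decide
  rcases eq_or_ne symbol "SNX" with h|h5
  · subst h; decide
  rcases eq_or_ne symbol "CRV" with h|h6
  · subst h; decide
  rcases eq_or_ne symbol "AXS" with h|h7
  · subst h; decide
  rcases eq_or_ne symbol "SAND" with h|h8
  · subst h; decide
  rcases eq_or_ne symbol "MANA" with h|h9
  · subst h; decide
  rcases eq_or_ne symbol "ENJ" with h|h10
  · subst h; decide
  rcases eq_or_ne symbol "ETH" with h|h11
  · subst h; decide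
  rcases eq_or_ne symbol "DOT" with h|h12
  · subst h; decide
  rcases eq_or_ne symbol "AVAX" with h|h13
  · subst h; decide
  rcases eq_or_ne symbol "SOL" with h|h14
  · subst h; decide
  rcases eq_or_ne symbol "MATIC" with h|h15
  · subst h; decide
  rcases eq_or_ne symbol "BTC" with h|h16
  · subst h; decide
  rcases eq_or_ne symbol "XRP" with h|h17
  · subst h; decide
  rcases eq_or_ne symbol "LTC" with h|h18
  · subst h; decide
  rcases eq_or_ne symbol "BCH" with h|h19
  · subst h; decide
  -- symbol is none of the 19 tokens: both sides return "unknown"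
  have hA : classify_token_category_py symbol = "unknown" := by
    simp [classify_token_category_py, pvHints, pvLoopA,
      h1, h2, h3, h4, h5, h6, h7, h8, h9, h10, h11, h12, h13, h14, h15, h16, h17, h18, h19]
  have hB : classify_token_category_py_alt symbol = "unknown" := by
    unfold classify_token_category_py_alt
    set lo := pvBisect symbol pvPairs.length 0 pvPairs.length with hlo
    by_cases hlt : lo < pvPairs.length
    · have hm := pv_fst_mem lo (by simpa [pvPairs] using hlt)
      have hne : (pvPairs.getD lo ("", "")).1 ≠ symbol := by
        intro he
        rw [he] at hm
        simp only [List.mem_cons, List.not_mem_nil, or_false] at hm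
        rcases hm with h|h|h|h|h|h|h|h|h|h|h|h|h|h|h|h|h|h|h <;>
          first
          | exact h1 h | exact h2 h | exact h3 h | exact h4 h | exact h5 h
          | exact h6 h | exact h7 h | exact h8 h | exact h9 h | exact h10 h
          | exact h11 h | exact h12 h | exact h13 h | exact h14 h | exact h15 h
          | exact h16 h | exact h17 h | exact h18 h | exact h19 h
      have hne' : pvPairs[lo].1 ≠ symbol := by
        simpa [List.getElem?_eq_getElem hlt] using hne
      simp [hlt, hne']
    · simp [hlt]
  rw [hA, hB]

-- ===== VERDICT (by name: the statement is the Claim_ definition above) =====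
theorem classify_token_category_py_spec : Claim_equal_classify_token_category_py := by
  intro symbol _
  exact pv_eq symbol
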